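-- pv_equiv track=rewrite | github.com/appsjit/testament | LeetCode/DailyCoding/dc_5_69_brickWallCuts.py | lesserCuts
-- ===== SOURCE A (Python) =====
-- from collections import defaultdict
--
-- def lesserCuts(wall):
--     myDict = defaultdict(int)
--     rows = len(wall)
--     for r in wall:
--         brLen = 0
--         for brick in r[:-1]: ##  Not considering last brick
--             brLen += brick
--             myDict[brLen] += 1
--
--     return rows - max(myDict.values())
-- ===== SOURCE B (Python) =====
-- def lesserCuts(wall):
--     edges = []
--     for r in wall:
--         s = 0
--         for b in r[:-1]:
--             s += b
--             edges.append(s)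
--     edges.sort()
--     best = 0
--     run = 0
--     prev = None
--     for e in edges:
--         run = run + 1 if e == prev else 1
--         prev = e
--         if run > best:
--             best = run
--     return len(wall) - best
-- ===== Notes on version B (the rewrite author's own statement) =====
-- stated objective: alternative
-- what changed: B replaces A's defaultdict edge-counting with a flat list of all interior-edge positions that is sorted once and scanned for the longest run of equal values; A's hash-map tally disappears entirely.
import Mathlib
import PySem

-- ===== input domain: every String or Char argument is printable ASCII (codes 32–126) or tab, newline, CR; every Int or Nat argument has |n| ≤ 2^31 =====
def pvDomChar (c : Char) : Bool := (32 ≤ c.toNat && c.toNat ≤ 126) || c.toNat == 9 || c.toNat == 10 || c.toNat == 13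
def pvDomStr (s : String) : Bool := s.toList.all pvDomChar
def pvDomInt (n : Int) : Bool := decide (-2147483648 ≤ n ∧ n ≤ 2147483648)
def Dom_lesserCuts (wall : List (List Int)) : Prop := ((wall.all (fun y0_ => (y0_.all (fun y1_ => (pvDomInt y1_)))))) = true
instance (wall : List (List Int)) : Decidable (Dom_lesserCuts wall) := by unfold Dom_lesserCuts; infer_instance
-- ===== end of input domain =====

-- B replaces A's defaultdict tally of edge positions by one flat sorted list of all
-- interior-edge positions scanned for the longest run of equal values (objective:
-- alternative algorithm of similar cost).

-- ===== PORT A =====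
-- loop body of A's inner 'for brick in r[:-1]': brLen += brick; myDict[brLen] += 1
def lesserCutsStepA (st : Int × PySem.Dict Int Int) (brick : Int) : Int × PySem.Dict Int Int :=
  (st.1 + brick, st.2.modify (st.1 + brick) 0 (· + 1))

def lesserCuts (wall : List (List Int)) : Int :=
  let myDict : PySem.Dict Int Int :=
    wall.foldl (fun d r => ((PySem.List.slice r none (some (-1))).foldl lesserCutsStepA (0, d)).2)
      PySem.Dict.empty
  let rows : Int := wall.length
  -- Python's max(myDict.values()) raises ValueError on an empty dict; Pre_ excludes that case
  rows - (PySem.List.max? myDict.values (fun v => v)).getD 0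

-- ===== PORT B =====
-- loop body of B's inner 'for b in r[:-1]': s += b; edges.append(s)
def lesserCutsStepCollect (st : Int × List Int) (b : Int) : Int × List Int :=
  (st.1 + b, st.2 ++ [st.1 + b])

-- loop body of B's run scan: run = run+1 if e == prev else 1; prev = e; best = max(best, run)
def lesserCutsStepScan (st : Int × Int × Option Int) (e : Int) : Int × Int × Option Int :=
  let run : Int := if some e = st.2.2 then st.2.1 + 1 else 1
  (if run > st.1 then run else st.1, run, some e)

def lesserCuts_alt (wall : List (List Int)) : Int :=
  let edges : List Int :=
    wall.foldl (fun acc r => ((PySem.List.slice r none (some (-1))).foldl lesserCutsStepCollect (0, acc)).2) []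
  let sortedEdges := PySem.List.sorted edges (fun x => x)
  let fin := sortedEdges.foldl lesserCutsStepScan (0, 0, none)
  (wall.length : Int) - fin.1

-- ===== PRECONDITION & SPEC =====
-- Pre_ excludes exactly the walls whose rows all have at most one brick: there A's
-- max() over an empty dict raises ValueError (no value is returned).
def Pre_lesserCuts (wall : List (List Int)) : Prop := ∃ r ∈ wall, 2 ≤ r.length
instance (wall : List (List Int)) : Decidable (Pre_lesserCuts wall) := by unfold Pre_lesserCuts; infer_instance

def pvWitness_lesserCuts : List (List Int) := [[1, 1], [2]]

def Spec_lesserCuts (wall : List (List Int)) (out : Int) : Prop := out = lesserCuts_alt wall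
instance (wall : List (List Int)) (out : Int) : Decidable (Spec_lesserCuts wall out) := by unfold Spec_lesserCuts; infer_instance

-- ===== CLAIM (what is proved, stated in full; the proofs are below) =====
def Claim_equal_lesserCuts : Prop := ∀ (wall : List (List Int)), Dom_lesserCuts wall → Pre_lesserCuts wall → Spec_lesserCuts wall (lesserCuts wall)

-- ===== LEMMAS AND PROOFS =====

-- prefix sums of a row's bricks starting from partial length s: the interior edge positions
def pvPsum (s : Int) : List Int → List Int
  | [] => []
  | b :: t => (s + b) :: pvPsum (s + b) t

-- the flat list of all interior edge positions of the wall
def pvEdges (wall : List (List Int)) : List Int := wall.flatMap (fun r => pvPsum 0 r.dropLast)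

lemma innerA (l : List Int) : ∀ (s : Int) (d : PySem.Dict Int Int),
    l.foldl lesserCutsStepA (s, d)
      = (s + l.sum, (pvPsum s l).foldl (fun d x => d.modify x 0 (· + 1)) d) := by
  induction l with
  | nil => intro s d; simp [pvPsum]
  | cons b t ih =>
      intro s d
      simp only [List.foldl_cons, lesserCutsStepA, pvPsum]
      rw [ih]
      simp; ring

lemma dictA (wall : List (List Int)) :
    wall.foldl (fun d r => ((PySem.List.slice r none (some (-1))).foldl lesserCutsStepA (0, d)).2)
        PySem.Dict.empty
      = PySem.Dict.counter (pvEdges wall) := by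
  rw [PySem.Dict.counter_eq_foldl]
  suffices h : ∀ (w : List (List Int)) (d : PySem.Dict Int Int),
      w.foldl (fun d r => ((PySem.List.slice r none (some (-1))).foldl lesserCutsStepA (0, d)).2) d
        = (pvEdges w).foldl (fun d x => d.modify x 0 (· + 1)) d by
    exact h wall _
  intro w
  induction w with
  | nil => intro d; simp [pvEdges]
  | cons r t ih =>
      intro d
      simp only [List.foldl_cons, pvEdges, List.flatMap_cons, List.foldl_append]
      rw [PySem.List.slice_to_neg_one, innerA, ih]
      rfl

lemma innerB (l : List Int) : ∀ (s : Int) (acc : List Int),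
    l.foldl lesserCutsStepCollect (s, acc) = (s + l.sum, acc ++ pvPsum s l) := by
  induction l with
  | nil => intro s acc; simp [pvPsum]
  | cons b t ih =>
      intro s acc
      simp only [List.foldl_cons, lesserCutsStepCollect, pvPsum]
      rw [ih]
      simp; ring

lemma edgesB (wall : List (List Int)) :
    wall.foldl (fun acc r => ((PySem.List.slice r none (some (-1))).foldl lesserCutsStepCollect (0, acc)).2) []
      = pvEdges wall := by
  have h : ∀ (w : List (List Int)) (acc : List Int),
      w.foldl (fun acc r => ((PySem.List.slice r none (some (-1))).foldl lesserCutsStepCollect (0, acc)).2) acc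
        = acc ++ pvEdges w := by
    intro w
    induction w with
    | nil => intro acc; simp [pvEdges]
    | cons r t ih =>
        intro acc
        simp only [List.foldl_cons, pvEdges, List.flatMap_cons]
        rw [PySem.List.slice_to_neg_one, innerB, ih]
        simp [pvEdges]
  simpa using h wall []

-- the best component of the scan is shifted by max with the initial best
lemma scan_shift (L : List Int) : ∀ (b r : Int) (p : Option Int), 0 ≤ b → 0 ≤ r →
    L.foldl lesserCutsStepScan (b, r, p)
      = (max b (L.foldl lesserCutsStepScan (0, r, p)).1, (L.foldl lesserCutsStepScan (0, r, p)).2) := by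
  induction L with
  | nil => intro b r p hb hr; simp; omega
  | cons e L ih =>
      intro b r p hb hr
      simp only [List.foldl_cons, lesserCutsStepScan]
      set run : Int := if some e = p then r + 1 else 1 with hrun
      have hrun1 : 1 ≤ run := by rw [hrun]; split <;> omega
      have h1 : (if run > b then run else b) = max b run := by omega
      have h2 : (if run > (0:Int) then run else 0) = run := by omega
      rw [h1, h2, ih (max b run) run (some e) (by omega) (by omega),
          ih run run (some e) (by omega) (by omega)]
      simp only [Prod.mk.injEq]
      exact ⟨by omega, trivial⟩

lemma stepScan_eq (b r : Int) (p : Option Int) (e : Int) :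
    lesserCutsStepScan (b, r, p) e
      = (max b (if some e = p then r + 1 else 1), (if some e = p then r + 1 else 1), some e) := by
  by_cases h : some e = p <;>
    simp only [lesserCutsStepScan, h, if_true, if_false, Prod.mk.injEq, and_true] <;>
    omega

lemma scan_replicate (n : Nat) (x : Int) : ∀ (b r : Int), r ≤ b →
    (List.replicate n x).foldl lesserCutsStepScan (b, r, some x) = (max b (r + n), r + n, some x) := by
  induction n with
  | zero => intro b r h; simp; omega
  | succ n ih =>
      intro b r h
      rw [List.replicate_succ, List.foldl_cons, stepScan_eq b r (some x) x, if_pos rfl]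
      rw [ih (max b (r + 1)) (r + 1) (le_max_right _ _)]
      simp only [Prod.mk.injEq]
      refine ⟨by push_cast; omega, by push_cast; omega, trivial⟩

-- characterisation of the scan result on a sorted list: it is the maximal multiplicity,
-- attained by some element and bounding the multiplicity of every element
lemma scan_spec : ∀ (n : Nat) (S : List Int), S.length ≤ n → S.Pairwise (· ≤ ·) → S ≠ [] →
    (∃ k ∈ S, (S.count k : Int) = (S.foldl lesserCutsStepScan (0, 0, none)).1) ∧
      ∀ k ∈ S, (S.count k : Int) ≤ (S.foldl lesserCutsStepScan (0, 0, none)).1 := by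
  intro n
  induction n with
  | zero => intro S hlen _ hne; cases S with
      | nil => exact absurd rfl hne
      | cons a t => simp at hlen
  | succ n ih =>
      intro S hlen hsorted hne
      obtain ⟨x, t, rfl⟩ := List.exists_cons_of_ne_nil hne
      -- decompose: S = replicate (pre.length+1) x ++ S2, x ∉ S2, S2 sorted
      set pre := t.takeWhile (fun y => y == x) with hpre
      set S2 := t.dropWhile (fun y => y == x) with hS2
      have ht : t = pre ++ S2 := (List.takeWhile_append_dropWhile).symm
      have hprerep : pre = List.replicate pre.length x := by
        apply List.eq_replicate_of_mem
        intro y hy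
        have := List.mem_takeWhile_imp hy
        simpa using this.symm
      have hS : x :: t = List.replicate (pre.length + 1) x ++ S2 := by
        rw [List.replicate_succ]
        conv_lhs => rw [ht, hprerep]
        simp
      have hxle : ∀ y ∈ t, x ≤ y := by
        intro y hy; exact (List.pairwise_cons.mp hsorted).1 y hy
      have hS2sub : S2.Sublist t := List.dropWhile_sublist _
      have hS2sorted : S2.Pairwise (· ≤ ·) := ((List.pairwise_cons.mp hsorted).2).sublist hS2sub
      have hxnot : x ∉ S2 := by
        intro hx
        cases hhead : S2 with
        | nil => rw [hhead] at hx; simp at hx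
        | cons e rest =>
            have hex' : e ≠ x := by
              have := List.head?_dropWhile_not (fun y => y == x) t
              rw [← hS2, hhead] at this
              simpa using this
            have hxe : x ≤ e := hxle e (hS2sub.mem (by rw [hhead]; simp))
            have hsr : (e :: rest).Pairwise (· ≤ ·) := hhead ▸ hS2sorted
            have hx' : x ∈ e :: rest := hhead ▸ hx
            rcases List.mem_cons.mp hx' with heq | hx2
            · exact hex' heq.symm
            · have : e ≤ x := (List.pairwise_cons.mp hsr).1 x hx2
              omega
      -- counts
      have hcount_x : (x :: t).count x = pre.length + 1 := by
        rw [hS, List.count_append, List.count_replicate, List.count_eq_zero_of_not_mem hxnot]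
        simp
      have hcount_ne : ∀ k, k ≠ x → (x :: t).count k = S2.count k := by
        intro k hk
        rw [hS, List.count_append, List.count_replicate]
        simp [Ne.symm hk]
      have hmemS : ∀ k, k ∈ x :: t ↔ k = x ∨ k ∈ S2 := by
        intro k
        rw [hS]
        simp [List.mem_replicate]
      -- scan over the replicate prefix
      have hstep1 : lesserCutsStepScan (0, 0, none) x = (1, 1, some x) := by
        simp [lesserCutsStepScan]
      have hfold : (x :: t).foldl lesserCutsStepScan (0, 0, none)
          = S2.foldl lesserCutsStepScan ((pre.length : Int) + 1, (pre.length : Int) + 1, some x) := by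
        rw [hS, List.replicate_succ, List.cons_append, List.foldl_cons, List.foldl_append, hstep1,
            scan_replicate pre.length x 1 1 le_rfl]
        have heq : ((max 1 (1 + (pre.length : Int)), 1 + (pre.length : Int), some x) : Int × Int × Option Int)
            = ((pre.length : Int) + 1, (pre.length : Int) + 1, some x) := by
          simp only [Prod.mk.injEq]
          refine ⟨by omega, by omega, trivial⟩
        rw [heq]
      cases hS2c : S2 with
      | nil =>
          rw [hS2c] at hfold
          simp only [List.foldl_nil] at hfold
          constructor
          · refine ⟨x, by simp, ?_⟩
            rw [hcount_x, hfold]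
            omega
          · intro k hk
            rcases (hmemS k).mp hk with rfl | hk2
            · rw [hcount_x, hfold]; push_cast; omega
            · rw [hS2c] at hk2; simp at hk2
      | cons e rest =>
          have hS2ne : S2 ≠ [] := by rw [hS2c]; simp
          have hS2len : S2.length ≤ n := by
            have := hS2sub.length_le
            simp only [List.length_cons] at hlen
            omega
          obtain ⟨⟨k0, hk0mem, hk0⟩, hub⟩ := ih S2 hS2len hS2sorted hS2ne
          have hex' : e ≠ x := by
            intro h; exact hxnot (by rw [hS2c, h]; simp)
          -- first step of the continuation resets the run
          have hstep : lesserCutsStepScan ((pre.length : Int) + 1, (pre.length : Int) + 1, some x) e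
              = ((pre.length : Int) + 1, 1, some e) := by
            simp only [lesserCutsStepScan]
            rw [if_neg (by simp [hex'] : ¬ (some e = some x))]
            rw [if_neg (by omega : ¬ ((1:Int) > (pre.length : Int) + 1))]
          have hstep0 : lesserCutsStepScan (0, 0, none) e = (1, 1, some e) := by
            simp [lesserCutsStepScan]
          have hmain : ((x :: t).foldl lesserCutsStepScan (0, 0, none)).1
              = max ((pre.length : Int) + 1) ((S2.foldl lesserCutsStepScan (0, 0, none)).1) := by
            rw [hfold, hS2c]
            simp only [List.foldl_cons]
            rw [hstep, hstep0,
                scan_shift rest ((pre.length : Int) + 1) 1 (some e) (by omega) (by omega),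
                scan_shift rest 1 1 (some e) (by omega) (by omega)]
            simp only []
            omega
          rw [hmain]
          constructor
          · rcases le_total ((S2.foldl lesserCutsStepScan (0, 0, none)).1) ((pre.length : Int) + 1) with hle | hle
            · refine ⟨x, by simp, ?_⟩
              rw [hcount_x]
              push_cast
              omega
            · refine ⟨k0, (hmemS k0).mpr (Or.inr hk0mem), ?_⟩
              have hk0x : k0 ≠ x := fun h => hxnot (h ▸ hk0mem)
              rw [hcount_ne k0 hk0x, hk0]
              omega
          · intro k hk
            rcases (hmemS k).mp hk with rfl | hk2
            · rw [hcount_x]; push_cast; omega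
            · have hkx : k ≠ x := fun h => hxnot (h ▸ hk2)
              rw [hcount_ne k hkx]
              have := hub k hk2
              omega

-- uniqueness: any attained upper bound of the multiplicities IS max(Counter(E).values())
lemma max_count_unique (E : List Int) (v : Int)
    (hatt : ∃ k ∈ E, (E.count k : Int) = v) (hub : ∀ k ∈ E, (E.count k : Int) ≤ v) :
    (PySem.List.max? ((PySem.Set.ofList E).map (fun k => (E.count k : Int))) (fun v => v)).getD 0 = v := by
  obtain ⟨k0, hk0mem, hk0⟩ := hatt
  have hk0' : ((E.count k0 : Int)) ∈ (PySem.Set.ofList E).map (fun k => (E.count k : Int)) :=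
    List.mem_map.mpr ⟨k0, (PySem.Set.mem_ofList _ _).mpr hk0mem, rfl⟩
  cases hmax : PySem.List.max? ((PySem.Set.ofList E).map (fun k => (E.count k : Int))) (fun v => v) with
  | none =>
      rw [PySem.List.max?_eq_none_iff] at hmax
      rw [hmax] at hk0'
      simp at hk0'
  | some m =>
      have hmmem := PySem.List.max?_mem hmax
      obtain ⟨k1, hk1mem, hk1⟩ := List.mem_map.mp hmmem
      have hk1E : k1 ∈ E := (PySem.Set.mem_ofList _ _).mp hk1mem
      have h1 : m ≤ v := by rw [← hk1]; exact hub k1 hk1E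
      have h2 : v ≤ m := by
        have := PySem.List.max?_isMax hmax _ hk0'
        simpa [hk0] using this
      simp
      omega

-- the two final quantities coincide
lemma core_eq (E : List Int) :
    (PySem.List.max? (PySem.Dict.counter E).values (fun v => v)).getD 0
      = ((PySem.List.sorted E (fun x => x)).foldl lesserCutsStepScan (0, 0, none)).1 := by
  have hvals : (PySem.Dict.counter E).values = (PySem.Set.ofList E).map (fun k => (E.count k : Int)) := by
    have := PySem.Dict.items_counter (xs := E)
    simp only [PySem.Dict.values, this, List.map_map]
    rfl
  rw [hvals]
  cases hE : E with
  | nil => rfl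
  | cons a t =>
      rw [← hE]
      have hEne : E ≠ [] := by rw [hE]; simp
      set S := PySem.List.sorted E (fun x => x) with hSdef
      have hperm : S.Perm E := PySem.List.sorted_perm E (fun x => x) false
      have hSne : S ≠ [] := by
        intro h
        exact hEne ((h ▸ hperm).symm.eq_nil)
      have hSsorted : S.Pairwise (· ≤ ·) := by
        have := PySem.List.sorted_pairwise E (fun x => x)
        simpa using this
      obtain ⟨⟨k0, hk0mem, hk0⟩, hub⟩ := scan_spec S.length S le_rfl hSsorted hSne
      apply max_count_unique E _
      · refine ⟨k0, hperm.mem_iff.mp hk0mem, ?_⟩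
        rw [← hperm.count_eq]
        exact hk0
      · intro k hk
        rw [← hperm.count_eq]
        exact hub k (hperm.mem_iff.mpr hk)

lemma ports_eq (wall : List (List Int)) : lesserCuts wall = lesserCuts_alt wall := by
  unfold lesserCuts lesserCuts_alt
  simp only []
  rw [dictA, edgesB, core_eq]

-- ===== VERDICT (by name: the statement is the Claim_ definition above) =====
theorem lesserCuts_spec : Claim_equal_lesserCuts := by
  intro wall _ _
  exact ports_eq wall
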